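-- pv_equiv track=rewrite | github.com/shaform/disambig | utility/linkage/cdtb_align.py | extract_span
-- ===== SOURCE A (Python) =====
-- def extract_span(text, index, tokens, stats=None):
--     start = 0
--     text_span = ''
--
--     if stats is None:
--         stats = {}
--
--     extracted_tokens = []
--     for i, x in enumerate(tokens):
--         end = start + len(x)
--         if start >= index[0] and start < index[1] or end > index[0] and end <= index[1]:
--             text_span += x
--             extracted_tokens.append((i, len(x)))
--         start = end
--
--     if text in text_span:
--         if text != text_span:
--             stats['not fit boundary'] += 1
--         else:
--             stats['{:03d}'.format(len(extracted_tokens))] += 1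
--
--         offset = text_span.find(text)
--         offset_end = offset + len(text)
--
--         offsets = []
--         for i, length in extracted_tokens:
--             if offset < length:
--                 offsets.append('{}[{}:{}]'.format(i,
--                                                   max(0, offset),
--                                                   min(length,
--                                                       offset_end)
--                                                   ))
--                 if offset_end <= length:
--                     break
--             offset -= length
--             offset_end -= length
--
--         return offsets, None
--     else:
--         return None, text_span
-- ===== SOURCE B (Python) =====
-- def extract_span(text, index, tokens, stats=None):
--     if stats is None:
--         stats = {}
--     lo, hi = index[0], index[1]
--
--     # stage 1: absolute character boundaries of every token, then select by boundaries
--     bounds = [0]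
--     b = 0
--     for x in tokens:
--         b += len(x)
--         bounds.append(b)
--     picked = [k for k in range(len(tokens))
--               if lo <= bounds[k] < hi or lo < bounds[k + 1] <= hi]
--     text_span = ''.join(tokens[k] for k in picked)
--
--     if text not in text_span:
--         return None, text_span
--
--     if text != text_span:
--         stats['not fit boundary'] += 1
--     else:
--         stats['{:03d}'.format(len(picked))] += 1
--
--     offset = text_span.find(text)
--     offset_end = offset + len(text)
--
--     # stage 2: end positions of the picked tokens inside text_span (nondecreasing),
--     # then two cut points: j0 = first picked token ending after offset, j1 = first
--     # one (>= j0) ending at or after offset_end; the answer is the block j0..j1.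
--     ends = []
--     e = 0
--     for k in picked:
--         e += len(tokens[k])
--         ends.append(e)
--     n = len(picked)
--     j0 = 0
--     while j0 < n and ends[j0] <= offset:
--         j0 += 1
--     j1 = j0
--     while j1 < n and ends[j1] < offset_end:
--         j1 += 1
--     offsets = ['{}[{}:{}]'.format(picked[j],
--                                   max(0, offset - (ends[j] - len(tokens[picked[j]]))),
--                                   min(len(tokens[picked[j]]),
--                                       offset_end - (ends[j] - len(tokens[picked[j]]))))
--                for j in range(j0, min(j1 + 1, n))]
--     return offsets, None
-- ===== Notes on version B (the rewrite author's own statement) =====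
-- stated objective: alternative
-- what changed: B replaces A's single accumulating pass and break-driven emission loop by staged passes: it precomputes all token boundaries, selects overlapping tokens by a filter over those boundaries, and computes the emitted block arithmetically as a contiguous index range [j0, j1] between two cut points found in the nondecreasing list of picked-token end positions, instead of A's destructive offset decrementing with a conditional break.
import Mathlib
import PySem

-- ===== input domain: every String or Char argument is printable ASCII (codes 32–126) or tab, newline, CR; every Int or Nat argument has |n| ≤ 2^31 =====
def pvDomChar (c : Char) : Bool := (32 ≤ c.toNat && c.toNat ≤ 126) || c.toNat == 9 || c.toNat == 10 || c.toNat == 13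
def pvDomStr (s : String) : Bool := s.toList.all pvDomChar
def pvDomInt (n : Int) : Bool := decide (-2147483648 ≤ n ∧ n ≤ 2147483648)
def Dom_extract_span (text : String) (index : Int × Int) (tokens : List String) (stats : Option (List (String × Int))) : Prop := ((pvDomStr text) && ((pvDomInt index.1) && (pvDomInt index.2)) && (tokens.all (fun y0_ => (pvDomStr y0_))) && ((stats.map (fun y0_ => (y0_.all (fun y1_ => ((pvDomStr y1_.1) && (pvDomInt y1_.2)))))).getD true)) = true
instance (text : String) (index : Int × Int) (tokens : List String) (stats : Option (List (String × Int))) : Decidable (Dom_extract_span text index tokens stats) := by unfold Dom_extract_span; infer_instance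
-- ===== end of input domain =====

-- B replaces A's single accumulating pass with break-driven emission by staged passes: precomputed token
-- boundaries + a filter for the selection, and the emitted block computed as a contiguous index range
-- between two cut points in the nondecreasing list of picked-token end positions (objective: alternative).
-- Both Pythons mutate the caller's stats dict in place identically; the equivalence proved here is about the
-- return value only, and the stats KeyError cases are excluded by Pre_.

-- shared Python '{}[{}:{}]'.format(i, a, b)
def pyFmtSpan (i a b : Int) : String :=
  String.ofList (PySem.Int.toChars i ++ '[' :: PySem.Int.toChars a ++ ':' :: PySem.Int.toChars b ++ [']'])

-- ===== PORT A =====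
-- loop body of 'for i, x in enumerate(tokens)': state (start, text_span, extracted_tokens)
def esA_step (index : Int × Int) (st : Int × List Char × List (Int × Int)) (ix : Int × String) :
    Int × List Char × List (Int × Int) :=
  let e := st.1 + PySem.Str.len ix.2
  if (st.1 ≥ index.1 ∧ st.1 < index.2) ∨ (e > index.1 ∧ e ≤ index.2) then
    (e, st.2.1 ++ ix.2.toList, st.2.2 ++ [(ix.1, PySem.Str.len ix.2)])
  else (e, st.2.1, st.2.2)

-- 'for i, length in extracted_tokens' with the break, decrementing offset/offset_end
def esA_loop : List (Int × Int) → Int → Int → List String → List String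
  | [], _, _, acc => acc
  | (i, length) :: rest, off, offe, acc =>
    if off < length then
      (if offe ≤ length then acc ++ [pyFmtSpan i (max 0 off) (min length offe)]
       else esA_loop rest (off - length) (offe - length) (acc ++ [pyFmtSpan i (max 0 off) (min length offe)]))
    else esA_loop rest (off - length) (offe - length) acc

-- the stats '+= 1' updates mutate the caller's dict and do not reach the return value; the inputs where
-- Python raises KeyError there are excluded by Pre_extract_span
def extract_span (text : String) (index : Int × Int) (tokens : List String) (stats : Option (List (String × Int))) : Option (List String) × Option String :=
  let r := (PySem.List.enumerate tokens).foldl (esA_step index) (0, [], [])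
  let text_span := r.2.1
  if PySem.Chars.isIn text.toList text_span then
    let offset := PySem.Chars.find text_span text.toList
    (some (esA_loop r.2.2 offset (offset + PySem.Str.len text) []), none)
  else (none, some (String.ofList text_span))

-- ===== PORT B =====
-- body of the two boundary-building loops 'b += len(x); bounds.append(b)'
def esB_boundStep (st : List Int × Int) (x : String) : List Int × Int :=
  (st.1 ++ [st.2 + PySem.Str.len x], st.2 + PySem.Str.len x)

-- Source B: stage 1 builds all boundaries then filters range(len(tokens)); stage 2 builds the end positions of
-- the picked tokens, finds the two cut points j0/j1 by linear scans (ported as takeWhile lengths) and emits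
-- the contiguous block range(j0, min(j1+1, n)); indices k/picked[j] are always in range, so getD is exact
def extract_span_alt (text : String) (index : Int × Int) (tokens : List String) (stats : Option (List (String × Int))) : Option (List String) × Option String :=
  let bounds := (tokens.foldl esB_boundStep ([0], 0)).1
  let picked := (List.range tokens.length).filter (fun k =>
      decide ((index.1 ≤ bounds.getD k 0 ∧ bounds.getD k 0 < index.2) ∨
              (index.1 < bounds.getD (k+1) 0 ∧ bounds.getD (k+1) 0 ≤ index.2)))
  let text_span := PySem.Chars.join [] (picked.map (fun k => (tokens.getD k "").toList))
  if PySem.Chars.isIn text.toList text_span = false then (none, some (String.ofList text_span))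
  else
    let offset := PySem.Chars.find text_span text.toList
    let offset_end := offset + PySem.Str.len text
    let ends := (picked.foldl (fun st k => esB_boundStep st (tokens.getD k "")) (([] : List Int), 0)).1
    let j0 := (ends.takeWhile (fun e => decide (e ≤ offset))).length
    let j1 := j0 + ((ends.drop j0).takeWhile (fun e => decide (e < offset_end))).length
    (some ((List.range' j0 (min (j1+1) picked.length - j0)).map (fun j =>
        let k := picked.getD j 0
        let L := PySem.Str.len (tokens.getD k "")
        let p := ends.getD j 0 - L
        pyFmtSpan (k : Int) (max 0 (offset - p)) (min L (offset_end - p)))), none)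

-- ===== PRECONDITION & SPEC =====
-- declarative description of the span of overlapping tokens (for Pre_ only)
def pvOverlapIdx (index : Int × Int) (tokens : List String) : List Nat :=
  (List.range tokens.length).filter (fun k =>
    let s : Int := ((tokens.take k).map PySem.Str.len).sum
    let e : Int := s + PySem.Str.len (tokens.getD k "")
    decide ((index.1 ≤ s ∧ s < index.2) ∨ (index.1 < e ∧ e ≤ index.2)))

def pvSpanChars (index : Int × Int) (tokens : List String) : List Char :=
  ((pvOverlapIdx index tokens).map (fun k => (tokens.getD k "").toList)).flatten

-- the stats key the Python increments when text occurs in the span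
def pvStatKey (text : String) (index : Int × Int) (tokens : List String) : String :=
  if text.toList = pvSpanChars index tokens then
    PySem.Str.zfill (PySem.Int.toStr ((pvOverlapIdx index tokens).length : Int)) 3
  else "not fit boundary"

-- Pre_ excludes exactly the inputs where the Python raises KeyError: text occurs in the span of
-- overlapping tokens but stats is None or lacks the key incremented there; A returns on every other input.
def Pre_extract_span (text : String) (index : Int × Int) (tokens : List String) (stats : Option (List (String × Int))) : Prop :=
  PySem.Chars.isIn text.toList (pvSpanChars index tokens) = true →
    stats ≠ none ∧ pvStatKey text index tokens ∈ (stats.getD []).map Prod.fst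
instance (text : String) (index : Int × Int) (tokens : List String) (stats : Option (List (String × Int))) : Decidable (Pre_extract_span text index tokens stats) := by unfold Pre_extract_span; infer_instance

def pvWitness_extract_span : String × (Int × Int) × List String × (Option (List (String × Int))) :=
  ("b", (1, 2), ["a", "b", "c"], some [("001", 0)])

def Spec_extract_span (text : String) (index : Int × Int) (tokens : List String) (stats : Option (List (String × Int))) (out : Option (List String) × Option String) : Prop := out = extract_span_alt text index tokens stats
instance (text : String) (index : Int × Int) (tokens : List String) (stats : Option (List (String × Int))) (out : Option (List String) × Option String) : Decidable (Spec_extract_span text index tokens stats out) := by unfold Spec_extract_span; infer_instance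

-- ===== CLAIM (what is proved, stated in full; the proofs are below) =====
def Claim_equal_extract_span : Prop := ∀ (text : String) (index : Int × Int) (tokens : List String) (stats : Option (List (String × Int))), Dom_extract_span text index tokens stats → Pre_extract_span text index tokens stats → Spec_extract_span text index tokens stats (extract_span text index tokens stats)

-- ===== LEMMAS AND PROOFS =====

theorem join_nil_flatten (l : List (List Char)) : PySem.Chars.join [] l = l.flatten := by
  induction l with
  | nil => simp [PySem.Chars.join_nil]
  | cons x r ih =>
    cases r with
    | nil => simp [PySem.Chars.join_singleton]
    | cons y t => simp [PySem.Chars.join_cons_cons] at ih ⊢; simpa using ih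

-- "ends": prefix sums (1-based) of a list of lengths
def lensEnds : List Int → List Int
  | [] => []
  | L :: r => L :: (lensEnds r).map (fun e => L + e)

theorem length_lensEnds (ls : List Int) : (lensEnds ls).length = ls.length := by
  induction ls with
  | nil => rfl
  | cons L r ih => simp [lensEnds, ih]

theorem lensEnds_getD (ls : List Int) : ∀ (j : Nat), j < ls.length →
    (lensEnds ls).getD j 0 = (ls.take (j+1)).sum := by
  induction ls with
  | nil => intro j h; simp at h
  | cons L r ih =>
    intro j h
    cases j with
    | zero => simp [lensEnds]
    | succ j =>
      have hj : j < r.length := by simpa using h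
      have hlt : j < (lensEnds r).length := by rw [length_lensEnds]; exact hj
      simp only [lensEnds, List.getD_cons_succ, List.take_succ_cons, List.sum_cons]
      rw [List.getD_eq_getElem _ _ (by simpa using hlt), List.getElem_map,
          ← List.getD_eq_getElem _ 0 hlt, ih j hj]

-- both boundary loops: the fold appends the shifted prefix sums
theorem map_add_add (a b : Int) (l : List Int) :
    l.map (fun v => a + b + v) = (l.map (fun v => b + v)).map (fun v => a + v) := by
  induction l with
  | nil => simp
  | cons h t ih => simp only [List.map_cons, ih, List.cons.injEq, and_true]; ring

theorem esB_fold (ts : List String) : ∀ (acc : List Int) (e : Int),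
    ts.foldl esB_boundStep (acc, e)
      = (acc ++ (lensEnds (ts.map PySem.Str.len)).map (fun v => e + v),
         e + (ts.map PySem.Str.len).sum) := by
  induction ts with
  | nil => intro acc e; simp [lensEnds]
  | cons x r ih =>
    intro acc e
    simp only [List.foldl_cons, esB_boundStep]
    rw [ih]
    simp only [lensEnds, List.map_cons, List.sum_cons, Prod.mk.injEq]
    refine ⟨?_, by ring⟩
    rw [map_add_add e (PySem.Str.len x) (lensEnds (List.map PySem.Str.len r))]
    simp [List.map_map, Function.comp_def]

-- A's selection pass, written structurally
def selA (lo hi : Int) : Int → List (Int × String) → List (Int × String)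
  | _, [] => []
  | s, p :: r =>
    (if (s ≥ lo ∧ s < hi) ∨ (s + PySem.Str.len p.2 > lo ∧ s + PySem.Str.len p.2 ≤ hi) then [p] else [])
      ++ selA lo hi (s + PySem.Str.len p.2) r

theorem esA_fold (idx : Int × Int) (l : List (Int × String)) : ∀ (s : Int) (sp : List Char) (ext : List (Int × Int)),
    l.foldl (esA_step idx) (s, sp, ext)
      = (s + (l.map (fun p => PySem.Str.len p.2)).sum,
         sp ++ ((selA idx.1 idx.2 s l).map (fun p => p.2.toList)).flatten,
         ext ++ (selA idx.1 idx.2 s l).map (fun p => (p.1, PySem.Str.len p.2))) := by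
  induction l with
  | nil => intro s sp ext; simp [selA]
  | cons p r ih =>
    intro s sp ext
    by_cases h : (s ≥ idx.1 ∧ s < idx.2) ∨ (s + PySem.Str.len p.2 > idx.1 ∧ s + PySem.Str.len p.2 ≤ idx.2)
    · simp only [List.foldl_cons, esA_step, if_pos h, ih, selA, List.map_cons, List.sum_cons,
        List.flatten, List.map_append, List.flatten_append, Prod.mk.injEq]
      refine ⟨by ring, ?_, ?_⟩ <;> simp [if_pos h]
    · simp only [List.foldl_cons, esA_step, if_neg h, ih, selA, List.map_cons, List.sum_cons,
        Prod.mk.injEq]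
      refine ⟨by ring, ?_, ?_⟩ <;> simp [if_neg h]

-- prefix-sum of lengths of the first k strings
def pvS (full : List String) (k : Nat) : Int := ((full.take k).map PySem.Str.len).sum

def pvCond (lo hi : Int) (full : List String) (k : Nat) : Bool :=
  decide ((lo ≤ pvS full k ∧ pvS full k < hi) ∨ (lo < pvS full (k+1) ∧ pvS full (k+1) ≤ hi))

theorem pvS_succ (full : List String) (k : Nat) (hk : k < full.length) :
    pvS full (k+1) = pvS full k + PySem.Str.len (full.getD k "") := by
  have hk' : k < (full.map PySem.Str.len).length := by simpa using hk
  unfold pvS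
  rw [List.map_take, List.map_take, List.sum_take_succ _ _ hk', List.getElem_map,
    List.getD_eq_getElem _ _ hk]

-- A's structural selection over enumerate equals the boundary filter over indices
theorem selA_enum (lo hi : Int) : ∀ (ts pre full : List String), full = pre ++ ts →
    selA lo hi (pvS full pre.length) (PySem.List.enumerate ts (pre.length : Int))
      = (((List.range ts.length).map (· + pre.length)).filter (pvCond lo hi full)).map
          (fun (k : Nat) => ((k : Int), full.getD k "")) := by
  intro ts
  induction ts with
  | nil => intro pre full h; simp [selA, PySem.List.enumerate_nil]
  | cons x r ih =>
    intro pre full h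
    subst h
    have hget : (pre ++ x :: r).getD pre.length "" = x := by
      rw [List.getD_eq_getElem?_getD, List.getElem?_append_right (Nat.le_refl _)]
      simp
    have hS1 : pvS (pre ++ x :: r) (pre.length + 1)
        = pvS (pre ++ x :: r) pre.length + PySem.Str.len x := by
      rw [pvS_succ _ _ (by simp), hget]
    have hmap : ((List.range r.length).map Nat.succ).map (· + pre.length)
        = (List.range r.length).map (· + (pre.length + 1)) := by
      rw [List.map_map]
      exact List.map_congr_left fun k _ => by simp only [Function.comp_apply]; omega
    have hih := ih (pre ++ [x]) (pre ++ x :: r) (by simp)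
    simp only [List.length_append, List.length_cons, List.length_nil, Nat.add_zero,
      Nat.zero_add] at hih
    simp only [PySem.List.enumerate_cons, selA, List.length_cons, List.range_succ_eq_map,
      List.map_cons, List.map_map]
    rw [show ((0 : Nat) + pre.length) = pre.length from Nat.zero_add _]
    rw [show ((List.range r.length).map ((· + pre.length) ∘ Nat.succ))
          = (List.range r.length).map (· + (pre.length + 1)) by
        rw [← hmap, List.map_map]]
    rw [List.filter_cons]
    have hc : pvCond lo hi (pre ++ x :: r) pre.length
        = decide ((pvS (pre ++ x :: r) pre.length ≥ lo ∧ pvS (pre ++ x :: r) pre.length < hi) ∨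
            (pvS (pre ++ x :: r) pre.length + PySem.Str.len x > lo ∧
             pvS (pre ++ x :: r) pre.length + PySem.Str.len x ≤ hi)) := by
      simp only [pvCond, hS1, ge_iff_le, gt_iff_lt]
    have hstart : (pre.length : Int) + 1 = ((pre.length + 1 : Nat) : Int) := by push_cast; ring
    by_cases hcond : (pvS (pre ++ x :: r) pre.length ≥ lo ∧ pvS (pre ++ x :: r) pre.length < hi) ∨
        (pvS (pre ++ x :: r) pre.length + PySem.Str.len x > lo ∧
         pvS (pre ++ x :: r) pre.length + PySem.Str.len x ≤ hi)
    · have hct : pvCond lo hi (pre ++ x :: r) pre.length = true := by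
        rw [hc]; exact decide_eq_true hcond
      rw [if_pos hcond, ← hS1, hstart, hih]
      simp [hct, hget]
    · have hcf : pvCond lo hi (pre ++ x :: r) pre.length = false := by
        rw [hc]; exact decide_eq_false hcond
      rw [if_neg hcond, ← hS1, hstart, hih]
      simp [hcf]

-- esA_loop with accumulator
theorem esA_loop_acc (l : List (Int × Int)) : ∀ (off offe : Int) (acc : List String),
    esA_loop l off offe acc = acc ++ esA_loop l off offe [] := by
  induction l with
  | nil => intro off offe acc; simp [esA_loop]
  | cons p r ih =>
    intro off offe acc
    obtain ⟨i, L⟩ := p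
    by_cases h1 : off < L
    · by_cases h2 : offe ≤ L
      · simp [esA_loop, h1, h2]
      · simp only [esA_loop, if_pos h1, if_neg h2]
        rw [ih (off - L) (offe - L) (acc ++ _), ih (off - L) (offe - L) ([] ++ _)]
        simp
    · simp only [esA_loop, if_neg h1]
      exact ih _ _ acc

-- B's emission, abstracted over the picked data (index, length)
def emitF (q : List (Int × Int)) (ends : List Int) (off offe : Int) (j : Nat) : String :=
  pyFmtSpan (q.getD j (0,0)).1 (max 0 (off - (ends.getD j 0 - (q.getD j (0,0)).2)))
    (min (q.getD j (0,0)).2 (offe - (ends.getD j 0 - (q.getD j (0,0)).2)))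

def ebJ0 (q : List (Int × Int)) (off : Int) : Nat :=
  ((lensEnds (q.map (·.2))).takeWhile (fun e => decide (e ≤ off))).length

def ebJ1 (q : List (Int × Int)) (off offe : Int) : Nat :=
  ebJ0 q off + (((lensEnds (q.map (·.2))).drop (ebJ0 q off)).takeWhile (fun e => decide (e < offe))).length

def emitB (q : List (Int × Int)) (off offe : Int) : List String :=
  (List.range' (ebJ0 q off) (min (ebJ1 q off offe + 1) q.length - ebJ0 q off)).map
    (emitF q (lensEnds (q.map (·.2))) off offe)

theorem map_range'_succ_left {α : Type} (f : Nat → α) : ∀ (m s : Nat),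
    (List.range' (s+1) m).map f = (List.range' s m).map (fun j => f (j+1)) := by
  intro m
  induction m with
  | zero => intro s; simp
  | succ m ih => intro s; rw [List.range'_succ, List.range'_succ, List.map_cons, List.map_cons, ih]

theorem emitF_shift (i L : Int) (q : List (Int × Int)) (off offe : Int) (j : Nat) (hj : j < q.length) :
    emitF ((i,L)::q) (L :: (lensEnds (q.map (·.2))).map (fun v => L + v)) off offe (j+1)
      = emitF q (lensEnds (q.map (·.2))) (off - L) (offe - L) j := by
  have hj' : j < (lensEnds (q.map (·.2))).length := by
    rw [length_lensEnds, List.length_map]; exact hj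
  have hj'' : j < ((lensEnds (q.map (·.2))).map (fun v => L + v)).length := by simpa using hj'
  unfold emitF
  rw [List.getD_cons_succ, List.getD_cons_succ,
    List.getD_eq_getElem _ _ hj'', List.getElem_map, ← List.getD_eq_getElem _ 0 hj']
  congr 2 <;> omega

theorem ebJ0_le (q : List (Int × Int)) (off : Int) : ebJ0 q off ≤ q.length := by
  calc ebJ0 q off ≤ (lensEnds (q.map (·.2))).length := (List.takeWhile_sublist _).length_le
  _ = q.length := by rw [length_lensEnds, List.length_map]

theorem ebJ0_neg (q : List (Int × Int)) (hq : ∀ p ∈ q, 0 ≤ p.2) (off : Int) (h : off < 0) :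
    ebJ0 q off = 0 := by
  cases q with
  | nil => rfl
  | cons p r =>
    have h0 : 0 ≤ p.2 := hq p (by simp)
    unfold ebJ0
    rw [List.map_cons, show lensEnds (p.2 :: r.map (·.2))
        = p.2 :: (lensEnds (r.map (·.2))).map (fun v => p.2 + v) from rfl]
    rw [List.takeWhile_cons_of_neg (by simp; omega)]
    rfl

theorem takeWhile_le_shift (L off : Int) (Y : List Int) :
    (Y.map (fun v => L + v)).takeWhile (fun e => decide (e ≤ off))
      = (Y.takeWhile (fun v => decide (v ≤ off - L))).map (fun v => L + v) := by
  rw [List.takeWhile_map]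
  have hp : ((fun e => decide (e ≤ off)) ∘ fun v => L + v) = (fun v : Int => decide (v ≤ off - L)) := by
    funext v
    show decide (L + v ≤ off) = decide (v ≤ off - L)
    rw [decide_eq_decide]
    omega
  rw [hp]

theorem takeWhile_lt_shift (L offe : Int) (Y : List Int) :
    (Y.map (fun v => L + v)).takeWhile (fun e => decide (e < offe))
      = (Y.takeWhile (fun v => decide (v < offe - L))).map (fun v => L + v) := by
  rw [List.takeWhile_map]
  have hp : ((fun e => decide (e < offe)) ∘ fun v => L + v) = (fun v : Int => decide (v < offe - L)) := by
    funext v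
    show decide (L + v < offe) = decide (v < offe - L)
    rw [decide_eq_decide]
    omega
  rw [hp]

theorem ebJ0_cons_skip (i L : Int) (r : List (Int × Int)) (off : Int) (h : L ≤ off) :
    ebJ0 ((i,L)::r) off = ebJ0 r (off - L) + 1 := by
  unfold ebJ0
  rw [List.map_cons, show lensEnds (L :: r.map (·.2))
      = L :: (lensEnds (r.map (·.2))).map (fun v => L + v) from rfl]
  rw [List.takeWhile_cons_of_pos (by simpa using h), takeWhile_le_shift]
  simp [Nat.add_comm]

theorem ebJ1_cons_skip (i L : Int) (r : List (Int × Int)) (off offe : Int) (h : L ≤ off) :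
    ebJ1 ((i,L)::r) off offe = ebJ1 r (off - L) (offe - L) + 1 := by
  unfold ebJ1
  rw [ebJ0_cons_skip i L r off h]
  rw [List.map_cons, show lensEnds (L :: r.map (·.2))
      = L :: (lensEnds (r.map (·.2))).map (fun v => L + v) from rfl]
  rw [List.drop_succ_cons, ← List.map_drop, takeWhile_lt_shift]
  simp [Nat.add_comm, Nat.add_assoc, Nat.add_left_comm]

theorem ebJ0_cons_hit (i L : Int) (r : List (Int × Int)) (off : Int) (h : off < L) :
    ebJ0 ((i,L)::r) off = 0 := by
  unfold ebJ0
  rw [List.map_cons, show lensEnds (L :: r.map (·.2))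
      = L :: (lensEnds (r.map (·.2))).map (fun v => L + v) from rfl]
  rw [List.takeWhile_cons_of_neg (by simp; omega)]
  rfl

theorem ebJ1_cons_break (i L : Int) (r : List (Int × Int)) (off offe : Int)
    (h : off < L) (h2 : offe ≤ L) : ebJ1 ((i,L)::r) off offe = 0 := by
  unfold ebJ1
  rw [ebJ0_cons_hit i L r off h]
  rw [List.map_cons, show lensEnds (L :: r.map (·.2))
      = L :: (lensEnds (r.map (·.2))).map (fun v => L + v) from rfl]
  rw [List.drop_zero, List.takeWhile_cons_of_neg (by simp; omega)]
  rfl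

theorem ebJ1_cons_go (i L : Int) (r : List (Int × Int)) (hr : ∀ p ∈ r, 0 ≤ p.2)
    (off offe : Int) (h : off < L) (h2 : L < offe) :
    ebJ1 ((i,L)::r) off offe = ebJ1 r (off - L) (offe - L) + 1 := by
  have hj0 : ebJ0 r (off - L) = 0 := ebJ0_neg r hr _ (by omega)
  unfold ebJ1
  rw [ebJ0_cons_hit i L r off h, hj0]
  rw [List.map_cons, show lensEnds (L :: r.map (·.2))
      = L :: (lensEnds (r.map (·.2))).map (fun v => L + v) from rfl]
  rw [List.drop_zero, List.drop_zero, List.takeWhile_cons_of_pos (by simpa using h2),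
    takeWhile_lt_shift]
  simp [Nat.add_comm]

theorem emitF_cons_zero (i L : Int) (r : List (Int × Int)) (off offe : Int) :
    emitF ((i,L)::r) (lensEnds (((i,L)::r).map (·.2))) off offe 0
      = pyFmtSpan i (max 0 off) (min L offe) := by
  unfold emitF
  rw [List.map_cons, show lensEnds (L :: r.map (·.2))
      = L :: (lensEnds (r.map (·.2))).map (fun v => L + v) from rfl]
  simp only [List.getD_cons_zero]
  congr 2 <;> omega

theorem emit_eq : ∀ (q : List (Int × Int)), (∀ p ∈ q, 0 ≤ p.2) → ∀ (off offe : Int),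
    esA_loop q off offe [] = emitB q off offe := by
  intro q
  induction q with
  | nil => intro _ off offe; simp [esA_loop, emitB, ebJ0, ebJ1, lensEnds]
  | cons p r ih =>
    intro hq off offe
    obtain ⟨i, L⟩ := p
    have hL : (0 : Int) ≤ L := hq (i, L) (by simp)
    have hr : ∀ p ∈ r, 0 ≤ p.2 := fun p hp => hq p (by simp [hp])
    have hends : lensEnds (((i,L)::r).map (·.2))
        = L :: (lensEnds (r.map (·.2))).map (fun v => L + v) := by
      rw [List.map_cons]; rfl
    by_cases h1 : off < L
    · by_cases h2 : offe ≤ L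
      · -- emit the head and break
        simp only [esA_loop, if_pos h1, if_pos h2, List.nil_append]
        unfold emitB
        rw [ebJ0_cons_hit i L r off h1, ebJ1_cons_break i L r off offe h1 h2]
        rw [show min (0 + 1) (((i,L)::r).length) - 0 = 1 from by simp, List.range'_one]
        rw [List.map_cons, List.map_nil, emitF_cons_zero]
      · -- emit the head and continue
        push_neg at h2
        simp only [esA_loop, if_pos h1, if_neg (not_le.mpr h2), List.nil_append]
        rw [esA_loop_acc, ih hr (off - L) (offe - L)]
        unfold emitB
        rw [ebJ0_cons_hit i L r off h1, ebJ1_cons_go i L r hr off offe h1 h2,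
          ebJ0_neg r hr (off - L) (by omega)]
        have hm : min (ebJ1 r (off - L) (offe - L) + 1 + 1) (((i,L)::r).length) - 0
            = min (ebJ1 r (off - L) (offe - L) + 1) r.length + 1 := by
          simp only [List.length_cons]; omega
        rw [hm, List.range'_succ, List.map_cons, emitF_cons_zero]
        simp only [Nat.sub_zero, List.singleton_append]
        congr 1
        rw [map_range'_succ_left]
        refine List.map_congr_left fun j hj => ?_
        have hjlt : j < r.length := by
          have := (List.mem_range'_1.mp hj).2
          omega
        rw [hends]
        exact (emitF_shift i L r off offe j hjlt).symm
    · -- skip the head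
      push_neg at h1
      simp only [esA_loop, if_neg (not_lt.mpr h1)]
      rw [ih hr (off - L) (offe - L)]
      unfold emitB
      rw [ebJ0_cons_skip i L r off h1, ebJ1_cons_skip i L r off offe h1]
      have hj0le := ebJ0_le r (off - L)
      have hm : min (ebJ1 r (off - L) (offe - L) + 1 + 1) (((i,L)::r).length)
            - (ebJ0 r (off - L) + 1)
          = min (ebJ1 r (off - L) (offe - L) + 1) r.length - ebJ0 r (off - L) := by
        simp only [List.length_cons]; omega
      rw [hm, map_range'_succ_left]
      refine List.map_congr_left fun j hj => ?_
      have hjlt : j < r.length := by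
        have h := (List.mem_range'_1.mp hj).2
        omega
      rw [hends]
      exact (emitF_shift i L r off offe j hjlt).symm

theorem selA_top (lo hi : Int) (tokens : List String) :
    selA lo hi 0 (PySem.List.enumerate tokens)
      = ((List.range tokens.length).filter (pvCond lo hi tokens)).map
          (fun (k : Nat) => ((k : Int), tokens.getD k "")) := by
  have h := selA_enum lo hi tokens [] tokens rfl
  rw [show pvS tokens ([] : List String).length = 0 from by simp [pvS]] at h
  simpa using h

theorem bounds_getD (tokens : List String) (k : Nat) (hk : k ≤ tokens.length) :
    ((tokens.foldl esB_boundStep ([0], 0)).1).getD k 0 = pvS tokens k := by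
  rw [esB_fold tokens [0] 0]
  simp only [zero_add, List.map_id', List.singleton_append]
  cases k with
  | zero => simp [pvS]
  | succ k =>
    have hk' : k < (tokens.map PySem.Str.len).length := by simpa using hk
    rw [List.getD_cons_succ, lensEnds_getD _ k hk']
    simp [pvS, List.map_take]

theorem picked_eq (index : Int × Int) (tokens : List String) :
    (List.range tokens.length).filter (fun k =>
        decide ((index.1 ≤ ((tokens.foldl esB_boundStep ([0], 0)).1).getD k 0 ∧
                 ((tokens.foldl esB_boundStep ([0], 0)).1).getD k 0 < index.2) ∨
                (index.1 < ((tokens.foldl esB_boundStep ([0], 0)).1).getD (k+1) 0 ∧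
                 ((tokens.foldl esB_boundStep ([0], 0)).1).getD (k+1) 0 ≤ index.2)))
      = (List.range tokens.length).filter (pvCond index.1 index.2 tokens) := by
  apply List.filter_congr
  intro k hk
  have hklt := List.mem_range.mp hk
  rw [bounds_getD tokens k (le_of_lt hklt), bounds_getD tokens (k+1) hklt]
  rfl

theorem endsB_eq (tokens : List String) (picked : List Nat) :
    (picked.foldl (fun st k => esB_boundStep st (tokens.getD k "")) (([] : List Int), 0)).1
      = lensEnds (picked.map (fun k => PySem.Str.len (tokens.getD k ""))) := by
  have h : (picked.map (fun k => tokens.getD k "")).foldl esB_boundStep (([] : List Int), (0 : Int))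
      = picked.foldl (fun st k => esB_boundStep st (tokens.getD k "")) (([] : List Int), 0) :=
    List.foldl_map ..
  rw [← h, esB_fold]
  simp [List.map_map, Function.comp_def]

theorem q_getD (tokens : List String) (filt : List Nat) (j : Nat) (hj : j < filt.length) :
    (filt.map (fun (k : Nat) => ((k : Int), PySem.Str.len (tokens.getD k "")))).getD j (0, 0)
      = ((filt.getD j 0 : Int), PySem.Str.len (tokens.getD (filt.getD j 0) "")) := by
  have hj' : j < (filt.map (fun (k : Nat) => ((k : Int), PySem.Str.len (tokens.getD k "")))).length := by
    simpa using hj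
  rw [List.getD_eq_getElem _ _ hj', List.getElem_map, ← List.getD_eq_getElem _ 0 hj]

-- ===== VERDICT (by name: the statement is the Claim_ definition above) =====
theorem extract_span_spec : Claim_equal_extract_span := by
  intro text index tokens stats _ _
  unfold Spec_extract_span
  simp only [extract_span, extract_span_alt]
  rw [esA_fold index (PySem.List.enumerate tokens) 0 [] [], selA_top index.1 index.2 tokens,
    picked_eq index tokens, join_nil_flatten]
  simp only [List.map_map, Function.comp_def, List.nil_append]
  by_cases hin : PySem.Chars.isIn text.toList
      ((((List.range tokens.length).filter (pvCond index.1 index.2 tokens)).map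
        (fun k => (tokens.getD k "").toList)).flatten) = true
  · rw [if_pos hin, if_neg (by rw [hin]; simp)]
    set filt := (List.range tokens.length).filter (pvCond index.1 index.2 tokens) with hfilt
    set span := (filt.map (fun k => (tokens.getD k "").toList)).flatten with hspan
    set off := PySem.Chars.find span text.toList with hoff
    set offe := PySem.Chars.find span text.toList + PySem.Str.len text with hoffe
    set q := filt.map (fun (k : Nat) => ((k : Int), PySem.Str.len (tokens.getD k ""))) with hqdef
    have hq : ∀ p ∈ q, 0 ≤ p.2 := by
      intro p hp
      rw [hqdef] at hp
      obtain ⟨k, _, rfl⟩ := List.mem_map.mp hp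
      simp [PySem.Str.len_eq]
    rw [emit_eq q hq off offe]
    unfold emitB ebJ1 ebJ0
    rw [endsB_eq tokens filt]
    have hqs : q.map (·.2) = filt.map (fun k => PySem.Str.len (tokens.getD k "")) := by
      rw [hqdef, List.map_map]; rfl
    rw [hqs]
    have hql : q.length = filt.length := by rw [hqdef, List.length_map]
    rw [hql]
    refine congrArg (fun l => (some l, (none : Option String))) ?_
    refine List.map_congr_left fun j hj => ?_
    have hjlt : j < filt.length := by
      have hb := (List.mem_range'_1.mp hj).2
      have h0 : ((lensEnds (filt.map (fun k => PySem.Str.len (tokens.getD k "")))).takeWhile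
          (fun e => decide (e ≤ off))).length ≤ filt.length := by
        calc _ ≤ (lensEnds (filt.map (fun k => PySem.Str.len (tokens.getD k "")))).length :=
              (List.takeWhile_sublist _).length_le
        _ = filt.length := by rw [length_lensEnds, List.length_map]
      omega
    simp only [emitF, hqdef]
    rw [q_getD tokens filt j hjlt]
  · rw [if_neg (by simpa using hin), if_pos (by simpa using hin)]
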